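-- pv_equiv track=rewrite | github.com/kool7/Data_Structures_And_Algorithms | Hackerrank/30days/day8.py | anagramDistance
-- ===== SOURCE A (Python) =====
-- def anagramDistance(s1, s2):
--     count = 0
--     char_count = [0] * 26
--     for i in range(26):
--         char_count[i] = 0
--
--     for i in range(len( s1)):
--         char_count[ord(s1[i]) - ord('a')] += 1
--
--     for i in range(len(s2)):
--         char_count[ord(s2[i]) - ord('a')] -= 1
--         if (char_count[ord(s2[i]) -
--                        ord('a')] < 0) :
--             count += 1
--
--     return count
-- ===== SOURCE B (Python) =====
-- def _counts(s):
--     cnt = [0] * 26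
--     for c in s:
--         cnt[ord(c) - ord('a')] += 1
--     return cnt
--
--
-- def anagramDistance(s1, s2):
--     c1 = _counts(s1)
--     c2 = _counts(s2)
--     return sum(max(0, c2[i] - c1[i]) for i in range(26))
-- ===== Notes on version B (the rewrite author's own statement) =====
-- stated objective: alternative
-- what changed: Replaces A's interleaved single-pass decrement-with-conditional-count over s2 (mutating s1's count array in place) by tabulating two independent 26-slot count arrays and aggregating sum(max(0, c2[i]-c1[i])) in a separate final loop.
import Mathlib
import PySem

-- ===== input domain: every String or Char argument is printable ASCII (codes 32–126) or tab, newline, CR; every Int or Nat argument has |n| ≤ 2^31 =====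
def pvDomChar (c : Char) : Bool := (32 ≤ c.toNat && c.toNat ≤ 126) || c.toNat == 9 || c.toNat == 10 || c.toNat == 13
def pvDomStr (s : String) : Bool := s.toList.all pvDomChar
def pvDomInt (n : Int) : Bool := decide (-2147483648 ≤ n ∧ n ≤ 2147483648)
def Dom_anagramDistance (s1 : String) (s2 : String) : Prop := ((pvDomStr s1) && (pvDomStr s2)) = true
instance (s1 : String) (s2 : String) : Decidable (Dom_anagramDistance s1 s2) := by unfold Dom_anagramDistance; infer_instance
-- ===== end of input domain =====

-- B tabulates two independent 26-slot count arrays and aggregates max(0, c2[i]-c1[i]) in a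
-- separate final loop, instead of A's interleaved decrement-and-count pass over s2 (alternative).

-- ===== PORT A =====
def anagramDistance (s1 : String) (s2 : String) : Int :=
  let count : Int := 0
  let char_count : List Int := List.replicate 26 0
  let char_count : List Int :=
    (PySem.List.pyRange 0 26 1).foldl (fun cc i => PySem.List.pySetD cc i 0) char_count
  let char_count : List Int :=
    (PySem.List.pyRange 0 (PySem.Str.len s1) 1).foldl
      (fun cc i =>
        PySem.List.pySetD cc (((PySem.List.pyGetD s1.toList i ' ').toNat : Int) - 97)
          (PySem.List.pyGetD cc (((PySem.List.pyGetD s1.toList i ' ').toNat : Int) - 97) 0 + 1))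
      char_count
  let st : Int × List Int :=
    (PySem.List.pyRange 0 (PySem.Str.len s2) 1).foldl
      (fun (st : Int × List Int) i =>
        let cc := PySem.List.pySetD st.2 (((PySem.List.pyGetD s2.toList i ' ').toNat : Int) - 97)
          (PySem.List.pyGetD st.2 (((PySem.List.pyGetD s2.toList i ' ').toNat : Int) - 97) 0 - 1)
        if PySem.List.pyGetD cc (((PySem.List.pyGetD s2.toList i ' ').toNat : Int) - 97) 0 < 0 then
          (st.1 + 1, cc)
        else (st.1, cc))
      (count, char_count)
  st.1

-- ===== PORT B =====
def pvCounts (s : String) : List Int :=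
  s.toList.foldl
    (fun cc c =>
      PySem.List.pySetD cc ((c.toNat : Int) - 97)
        (PySem.List.pyGetD cc ((c.toNat : Int) - 97) 0 + 1))
    (List.replicate 26 0)

def anagramDistance_alt (s1 : String) (s2 : String) : Int :=
  let c1 := pvCounts s1
  let c2 := pvCounts s2
  ((PySem.List.pyRange 0 26 1).map
    (fun i => max 0 (PySem.List.pyGetD c2 i 0 - PySem.List.pyGetD c1 i 0))).sum

-- ===== PRECONDITION & SPEC =====
-- Pre_ admits exactly the inputs where the Python A returns: a character with code outside
-- [71, 122] makes ord(c) - ord('a') fall outside [-26, 25] and A raises IndexError.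
def Pre_anagramDistance (s1 : String) (s2 : String) : Prop :=
  (s1.toList.all (fun c => 71 ≤ c.toNat && c.toNat ≤ 122) &&
   s2.toList.all (fun c => 71 ≤ c.toNat && c.toNat ≤ 122)) = true
instance (s1 : String) (s2 : String) : Decidable (Pre_anagramDistance s1 s2) := by
  unfold Pre_anagramDistance; infer_instance

def pvWitness_anagramDistance : String × String := ("cab", "abcd")

def Spec_anagramDistance (s1 : String) (s2 : String) (out : Int) : Prop := out = anagramDistance_alt s1 s2
instance (s1 : String) (s2 : String) (out : Int) : Decidable (Spec_anagramDistance s1 s2 out) := by unfold Spec_anagramDistance; infer_instance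

-- ===== CLAIM (what is proved, stated in full; the proofs are below) =====
def Claim_equal_anagramDistance : Prop := ∀ (s1 : String) (s2 : String), Dom_anagramDistance s1 s2 → Pre_anagramDistance s1 s2 → Spec_anagramDistance s1 s2 (anagramDistance s1 s2)

-- ===== LEMMAS AND PROOFS =====

-- the slot a character actually touches: ord(c)-97 with Python's negative-index wrap on a 26-list
def pvSlot (c : Char) : Nat := (c.toNat - 71) % 26

def pvCnt (l : List Char) (j : Nat) : Int := (l.countP (fun c => pvSlot c == j) : Int)

def pvContrib (v m : Int) : Int := m - max 0 (min v m)

def pvF (cc : List Int) (c : Char) : List Int :=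
  PySem.List.pySetD cc ((c.toNat : Int) - 97)
    (PySem.List.pyGetD cc ((c.toNat : Int) - 97) 0 + 1)

def pvG (st : Int × List Int) (c : Char) : Int × List Int :=
  let cc := PySem.List.pySetD st.2 ((c.toNat : Int) - 97)
    (PySem.List.pyGetD st.2 ((c.toNat : Int) - 97) 0 - 1)
  if PySem.List.pyGetD cc ((c.toNat : Int) - 97) 0 < 0 then (st.1 + 1, cc) else (st.1, cc)

theorem pvSlot_lt (c : Char) : pvSlot c < 26 := Nat.mod_lt _ (by norm_num)

theorem pvCnt_nonneg (l : List Char) (j : Nat) : (0 : Int) ≤ pvCnt l j :=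
  Int.natCast_nonneg _

theorem pvCnt_cons (c : Char) (t : List Char) (j : Nat) :
    pvCnt (c :: t) j = pvCnt t j + (if pvSlot c = j then 1 else 0) := by
  unfold pvCnt
  rw [List.countP_cons]
  by_cases h : pvSlot c = j <;> simp [h]

theorem pvGetD_set (cc : List Int) (s : Nat) (v : Int) (j : Nat) (h : s < cc.length) :
    (cc.set s v).getD j 0 = if j = s then v else cc.getD j 0 := by
  simp [List.getD, List.getElem?_set]; split <;> simp_all [eq_comm]

theorem pvGet_slot (cc : List Int) (c : Char) (h26 : cc.length = 26)
    (hc : 71 ≤ c.toNat ∧ c.toNat ≤ 122) :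
    PySem.List.pyGetD cc ((c.toNat : Int) - 97) 0 = cc.getD (pvSlot c) 0 := by
  obtain ⟨h1, h2⟩ := hc
  simp only [PySem.List.pyGetD, PySem.List.pyGet?, PySem.List.pyIdx?, h26, List.getD]
  by_cases h97 : 97 ≤ c.toNat
  · rw [if_pos (by omega), if_pos (by omega)]
    dsimp only [Option.bind]
    congr 2
    unfold pvSlot; omega
  · rw [if_neg (by omega), if_pos (by omega)]
    dsimp only [Option.bind]
    congr 2
    unfold pvSlot; omega

theorem pvSet_slot (cc : List Int) (c : Char) (v : Int) (h26 : cc.length = 26)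
    (hc : 71 ≤ c.toNat ∧ c.toNat ≤ 122) :
    PySem.List.pySetD cc ((c.toNat : Int) - 97) v = cc.set (pvSlot c) v := by
  obtain ⟨h1, h2⟩ := hc
  simp only [PySem.List.pySetD, PySem.List.pySet?, PySem.List.pyIdx?, h26]
  by_cases h97 : 97 ≤ c.toNat
  · rw [if_pos (by omega), if_pos (by omega)]
    simp only [Option.map_some, Option.getD_some]
    congr 1
    unfold pvSlot; omega
  · rw [if_neg (by omega), if_pos (by omega)]
    simp only [Option.map_some, Option.getD_some]
    congr 1
    unfold pvSlot; omega

theorem pvF_foldl (l : List Char) : ∀ cc : List Int, cc.length = 26 →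
    (∀ c ∈ l, 71 ≤ c.toNat ∧ c.toNat ≤ 122) →
    (l.foldl pvF cc).length = 26 ∧
      ∀ j : Nat, (l.foldl pvF cc).getD j 0 = cc.getD j 0 + pvCnt l j := by
  induction l with
  | nil => intro cc h26 _; exact ⟨h26, fun j => by simp [pvCnt]⟩
  | cons c t ih =>
    intro cc h26 hl
    have hc := hl c (List.mem_cons_self)
    have hstep : pvF cc c = cc.set (pvSlot c) (cc.getD (pvSlot c) 0 + 1) := by
      unfold pvF
      rw [pvGet_slot cc c h26 hc, pvSet_slot cc c _ h26 hc]
    simp only [List.foldl_cons, hstep]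
    obtain ⟨ha, hb⟩ := ih (cc.set (pvSlot c) (cc.getD (pvSlot c) 0 + 1))
      (by simp [h26]) (fun x hx => hl x (List.mem_cons_of_mem _ hx))
    refine ⟨ha, fun j => ?_⟩
    rw [hb j, pvGetD_set _ _ _ _ (h26 ▸ pvSlot_lt c), pvCnt_cons]
    by_cases hj : j = pvSlot c
    · rw [if_pos hj, if_pos hj.symm, hj]; ring
    · rw [if_neg hj, if_neg (fun h => hj h.symm)]; ring

theorem pvG_foldl (l : List Char) : ∀ (n : Int) (cc : List Int), cc.length = 26 →
    (∀ c ∈ l, 71 ≤ c.toNat ∧ c.toNat ≤ 122) →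
    (l.foldl pvG (n, cc)).1 =
      n + ∑ j ∈ Finset.range 26, pvContrib (cc.getD j 0) (pvCnt l j) := by
  induction l with
  | nil =>
    intro n cc h26 _
    simp only [List.foldl_nil]
    rw [Finset.sum_eq_zero (fun j _ => by
      unfold pvContrib pvCnt
      simp only [List.countP_nil, Int.natCast_zero]
      omega)]
    ring
  | cons c t ih =>
    intro n cc h26 hl
    have hc := hl c (List.mem_cons_self)
    have hlt : pvSlot c < cc.length := h26 ▸ pvSlot_lt c
    have hstep : pvG (n, cc) c =
        (n + (if cc.getD (pvSlot c) 0 - 1 < 0 then 1 else 0),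
          cc.set (pvSlot c) (cc.getD (pvSlot c) 0 - 1)) := by
      unfold pvG
      simp only []
      rw [pvGet_slot cc c h26 hc, pvSet_slot cc c _ h26 hc]
      rw [pvGet_slot (cc.set (pvSlot c) (cc.getD (pvSlot c) 0 - 1)) c (by simp [h26]) hc]
      rw [pvGetD_set _ _ _ _ hlt]
      have hrfl : (if pvSlot c = pvSlot c then cc.getD (pvSlot c) 0 - 1
          else cc.getD (pvSlot c) 0) = cc.getD (pvSlot c) 0 - 1 := if_pos rfl
      rw [hrfl]
      by_cases hneg : cc.getD (pvSlot c) 0 - 1 < 0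
      · rw [if_pos hneg, if_pos hneg]
      · rw [if_neg hneg, if_neg hneg]; norm_num
    simp only [List.foldl_cons, hstep]
    rw [ih (n + (if cc.getD (pvSlot c) 0 - 1 < 0 then 1 else 0))
      (cc.set (pvSlot c) (cc.getD (pvSlot c) 0 - 1)) (by simp [h26])
      (fun x hx => hl x (List.mem_cons_of_mem _ hx))]
    have hpt : ∀ j ∈ Finset.range 26,
        pvContrib (cc.getD j 0) (pvCnt (c :: t) j) =
          pvContrib ((cc.set (pvSlot c) (cc.getD (pvSlot c) 0 - 1)).getD j 0) (pvCnt t j) +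
            (if j = pvSlot c then (if cc.getD (pvSlot c) 0 - 1 < 0 then 1 else 0) else 0) := by
      intro j _
      rw [pvCnt_cons, pvGetD_set _ _ _ _ hlt]
      have hm : (0:Int) ≤ pvCnt t j := pvCnt_nonneg t j
      by_cases hjs : j = pvSlot c
      · subst hjs
        rw [if_pos rfl, if_pos rfl, if_pos rfl]
        unfold pvContrib
        split_ifs <;> omega
      · rw [if_neg (fun h => hjs h.symm), if_neg hjs, if_neg hjs]
        simp
    rw [Finset.sum_congr rfl hpt, Finset.sum_add_distrib]
    have hsingle : ∑ j ∈ Finset.range 26,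
        (if j = pvSlot c then (if cc.getD (pvSlot c) 0 - 1 < 0 then 1 else 0) else 0) =
        (if cc.getD (pvSlot c) 0 - 1 < 0 then (1:Int) else 0) := by
      simp [Finset.sum_ite_eq', Finset.mem_range, pvSlot_lt]
    rw [hsingle]
    ring

set_option maxRecDepth 8192 in
theorem pvZero :
    (PySem.List.pyRange 0 26 1).foldl (fun cc i => PySem.List.pySetD cc i 0)
      (List.replicate 26 (0:Int)) = List.replicate 26 0 := by decide

theorem pvA_eq (s1 s2 : String) :
    anagramDistance s1 s2 =
      (s2.toList.foldl pvG ((0:Int), s1.toList.foldl pvF (List.replicate 26 0))).1 := by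
  show ((PySem.List.pyRange 0 (PySem.Str.len s2) 1).foldl
      (fun st i => pvG st (PySem.List.pyGetD s2.toList i ' '))
      ((0:Int),
        (PySem.List.pyRange 0 (PySem.Str.len s1) 1).foldl
          (fun cc i => pvF cc (PySem.List.pyGetD s1.toList i ' '))
          ((PySem.List.pyRange 0 26 1).foldl (fun cc i => PySem.List.pySetD cc i 0)
            (List.replicate 26 0)))).1 =
    (s2.toList.foldl pvG ((0:Int), s1.toList.foldl pvF (List.replicate 26 0))).1
  rw [pvZero]
  simp only [PySem.Str.len_eq]
  rw [PySem.List.foldl_pyRange_zero_pyGetD' s1.toList ' ' pvF (List.replicate 26 0)]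
  rw [PySem.List.foldl_pyRange_zero_pyGetD' s2.toList ' ' pvG
    ((0:Int), s1.toList.foldl pvF (List.replicate 26 0))]

theorem pvMapCast (f : Int → Int) (g : Nat → Int) :
    ∀ l : List Nat, (∀ k ∈ l, f (k : Int) = g k) →
      ((l.map (fun (k : Nat) => (k : Int))).map f).sum = (l.map g).sum := by
  intro l
  induction l with
  | nil => intro _; rfl
  | cons a t ih =>
    intro h
    simp only [List.map_cons, List.sum_cons]
    rw [h a (by simp), ih (fun k hk => h k (by simp [hk]))]

theorem pvB_eq (s1 s2 : String) :
    anagramDistance_alt s1 s2 =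
      ∑ j ∈ Finset.range 26,
        max 0 ((s2.toList.foldl pvF (List.replicate 26 0)).getD j 0 -
               (s1.toList.foldl pvF (List.replicate 26 0)).getD j 0) := by
  show ((PySem.List.pyRange 0 26 1).map
      (fun i => max 0 (PySem.List.pyGetD (s2.toList.foldl pvF (List.replicate 26 0)) i 0 -
                       PySem.List.pyGetD (s1.toList.foldl pvF (List.replicate 26 0)) i 0))).sum = _
  rw [show (PySem.List.pyRange 0 26 1) = (List.range 26).map (fun (k : Nat) => (k : Int)) from by decide]
  rw [show (∑ j ∈ Finset.range 26,
        max 0 ((s2.toList.foldl pvF (List.replicate 26 0)).getD j 0 -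
               (s1.toList.foldl pvF (List.replicate 26 0)).getD j 0)) =
      ((List.range 26).map (fun j =>
        max 0 ((s2.toList.foldl pvF (List.replicate 26 0)).getD j 0 -
               (s1.toList.foldl pvF (List.replicate 26 0)).getD j 0))).sum from rfl]
  exact pvMapCast _ _ (List.range 26) (fun k _ => by simp [PySem.List.pyGetD_natCast])

-- ===== VERDICT (by name: the statement is the Claim_ definition above) =====
theorem anagramDistance_spec : Claim_equal_anagramDistance := by
  intro s1 s2 _ hpre
  simp only [Pre_anagramDistance, Bool.and_eq_true, List.all_eq_true] at hpre
  obtain ⟨hp1', hp2'⟩ := hpre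
  have hp1 : ∀ c ∈ s1.toList, 71 ≤ c.toNat ∧ c.toNat ≤ 122 := fun c hc => by
    have h := hp1' c hc; simp at h; exact h
  have hp2 : ∀ c ∈ s2.toList, 71 ≤ c.toNat ∧ c.toNat ≤ 122 := fun c hc => by
    have h := hp2' c hc; simp at h; exact h
  unfold Spec_anagramDistance
  have hrep : ∀ j : Nat, (List.replicate 26 (0:Int)).getD j 0 = 0 := fun j => by
    rw [List.getD_eq_getElem?_getD, List.getElem?_replicate]
    split <;> rfl
  obtain ⟨hl1, hg1⟩ := pvF_foldl s1.toList (List.replicate 26 0) (by simp) hp1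
  obtain ⟨hl2, hg2⟩ := pvF_foldl s2.toList (List.replicate 26 0) (by simp) hp2
  rw [pvA_eq, pvB_eq]
  rw [pvG_foldl s2.toList 0 _ hl1 hp2, zero_add]
  refine Finset.sum_congr rfl (fun j hj => ?_)
  rw [hg1 j, hg2 j, hrep j, zero_add, zero_add]
  have h0 : (0:Int) ≤ pvCnt s1.toList j := pvCnt_nonneg _ _
  have h0' : (0:Int) ≤ pvCnt s2.toList j := pvCnt_nonneg _ _
  unfold pvContrib
  omega
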